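-- pv_equiv track=rewrite | github.com/alyssating/CS101-Assignments | 101-assign5-cleverhangman/CleverHangman.py | getNewWordList
-- ===== SOURCE A (Python) =====
-- def createTemplate(currTemplate, letterGuess, word):
--     '''
--     This function creates a new template for the secret word that the user will see.
--     '''
--     newTemplate = []
--     for dex in range(len(word)):
--         if word[dex] == letterGuess:
--             newTemplate.append(word[dex])
--         elif currTemplate[dex] != "_":
--             newTemplate.append(currTemplate[dex])
--         else:
--             newTemplate.append("_")
--     return "".join(newTemplate)
--
-- def getNewWordList (currTemplate, letterGuess, wordList, debug):
--     '''
--     This function constructs a dictionary of strings as the key to lists as the value.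
--     It returns a 2-tuple, where the first element is the template corresponding to the
--     largest group of words, and the second element is the list of words that
--     match this template.
--     '''
--     dict = {}
--     for word in wordList:
--         k = createTemplate(currTemplate,letterGuess,word)
--         if k not in dict:
--             dict[k] = []
--         dict[k].append(word)
--     ret = sorted(sorted (dict.keys(), key = lambda x: x.count("_"), reverse = True), key = lambda y: len(dict[y]), reverse = True)
--     if debug:
--         for temp in sorted(dict.keys()):
--             print (temp + " : " + str(len(dict[temp])))
--         print ("# keys = " + str(len(dict.keys()))) # it's doing this twice each time
--         print ("# possible words: "+ str(len(dict[ret[0]])))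
--     return (ret[0],dict[ret[0]])
-- ===== SOURCE B (Python) =====
-- def createTemplate(currTemplate, letterGuess, word):
--     '''
--     This function creates a new template for the secret word that the user will see.
--     '''
--     newTemplate = []
--     for dex in range(len(word)):
--         if word[dex] == letterGuess:
--             newTemplate.append(word[dex])
--         elif currTemplate[dex] != "_":
--             newTemplate.append(currTemplate[dex])
--         else:
--             newTemplate.append("_")
--     return "".join(newTemplate)
--
-- def getNewWordList(currTemplate, letterGuess, wordList, debug):
--     # Count group sizes only (template -> count), then pick the best template with a
--     # single linear max over (size, underscore count) -- max returns the first maximal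
--     # key in insertion order, which is exactly the stable double-sort tie-break --
--     # and rebuild the winning group with one filtering pass over wordList.
--     counts = {}
--     for word in wordList:
--         k = createTemplate(currTemplate, letterGuess, word)
--         counts[k] = counts.get(k, 0) + 1
--     best = max(counts, key=lambda t: (counts[t], t.count("_")))
--     group = [w for w in wordList if createTemplate(currTemplate, letterGuess, w) == best]
--     if debug:
--         for temp in sorted(counts):
--             print(temp + " : " + str(counts[temp]))
--         print("# keys = " + str(len(counts)))
--         print("# possible words: " + str(len(group)))
--     return (best, group)
-- ===== Notes on version B (the rewrite author's own statement) =====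
-- stated objective: simpler
-- what changed: B keeps only a template->count dict instead of a dict of lists, replaces the nested stable double sort with a single linear max over the (count, underscore-count) key, and rebuilds the winning group with one filtering pass.
import Mathlib
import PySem

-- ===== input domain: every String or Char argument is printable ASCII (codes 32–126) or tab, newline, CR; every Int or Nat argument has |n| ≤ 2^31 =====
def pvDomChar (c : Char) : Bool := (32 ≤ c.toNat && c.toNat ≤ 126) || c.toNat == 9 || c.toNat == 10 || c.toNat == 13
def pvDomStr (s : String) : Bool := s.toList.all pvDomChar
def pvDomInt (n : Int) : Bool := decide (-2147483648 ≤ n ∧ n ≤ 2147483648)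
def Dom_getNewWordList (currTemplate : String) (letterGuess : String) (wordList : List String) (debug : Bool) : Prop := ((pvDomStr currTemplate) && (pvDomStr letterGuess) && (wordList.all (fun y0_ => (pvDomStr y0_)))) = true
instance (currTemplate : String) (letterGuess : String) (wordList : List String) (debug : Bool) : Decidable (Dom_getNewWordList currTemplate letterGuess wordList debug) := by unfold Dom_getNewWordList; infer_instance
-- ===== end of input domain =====

-- B replaces A's dict-of-lists plus nested stable double sort with a count dict, one
-- linear lexicographic max and one filtering pass (objective: simpler; return value only —
-- the Python debug branch only prints and is not modelled by the ports).

-- ===== PORT A =====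
-- helper createTemplate, shared by both Pythons (word[dex]/currTemplate[dex] are 1-char
-- strings compared to strings; exact via PySem.List.pyGetD under Pre_'s in-range condition)
def createTemplatePV (ct : List Char) (g : List Char) (w : List Char) : List Char :=
  (PySem.List.pyRange 0 (w.length : Int) 1).foldl (fun acc dex =>
    if [PySem.List.pyGetD w dex ' '] = g then acc ++ [PySem.List.pyGetD w dex ' ']
    else if ¬ ([PySem.List.pyGetD ct dex ' '] = ['_']) then acc ++ [PySem.List.pyGetD ct dex ' ']
    else acc ++ ['_']) []

def pvTmpl (currTemplate : String) (letterGuess : String) (w : String) : String :=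
  String.ofList (createTemplatePV currTemplate.toList letterGuess.toList w.toList)

def getNewWordList (currTemplate : String) (letterGuess : String) (wordList : List String) (debug : Bool) : String × List String :=
  let d : PySem.Dict String (List String) := wordList.foldl (fun d word =>
      let k := pvTmpl currTemplate letterGuess word
      let d1 := if d.contains k then d else d.insert k []
      d1.insert k (d1.getD k [] ++ [word])) PySem.Dict.empty
  let ret := PySem.List.sorted
      (PySem.List.sorted d.keys (fun x => PySem.Str.count x "_") true)
      (fun y => (d.getD y []).length) true
  -- Python's debug branch only prints; the ports model the return value
  let k0 := PySem.List.pyGetD ret 0 ""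
  (k0, d.getD k0 [])

-- ===== PORT B =====
def getNewWordList_alt (currTemplate : String) (letterGuess : String) (wordList : List String) (debug : Bool) : String × List String :=
  let counts : PySem.Dict String Int := wordList.foldl (fun d word =>
      let k := pvTmpl currTemplate letterGuess word
      d.insert k (d.getD k 0 + 1)) PySem.Dict.empty
  let best := (PySem.List.max2? counts.keys
      (fun t => counts.getD t 0) (fun t => PySem.Str.count t "_")).getD ""
  (best, wordList.filter (fun w => pvTmpl currTemplate letterGuess w == best))

-- ===== PRECONDITION & SPEC =====
-- Pre_ excludes exactly the inputs on which the Python A raises: an empty wordList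
-- (ret[0] is an IndexError) and any word reaching currTemplate[dex] out of range
-- (word longer than currTemplate at a position where word[dex] != letterGuess).
def Pre_getNewWordList (currTemplate : String) (letterGuess : String) (wordList : List String) (debug : Bool) : Prop :=
  wordList ≠ [] ∧ ∀ w ∈ wordList, ∀ i ∈ List.range w.toList.length,
    [w.toList.getD i ' '] = letterGuess.toList ∨ i < currTemplate.toList.length
instance (currTemplate : String) (letterGuess : String) (wordList : List String) (debug : Bool) : Decidable (Pre_getNewWordList currTemplate letterGuess wordList debug) := by unfold Pre_getNewWordList; infer_instance

def pvWitness_getNewWordList : String × String × List String × Bool := ("___", "a", ["cat", "car", "dog"], false)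

def Spec_getNewWordList (currTemplate : String) (letterGuess : String) (wordList : List String) (debug : Bool) (out : String × List String) : Prop := out = getNewWordList_alt currTemplate letterGuess wordList debug
instance (currTemplate : String) (letterGuess : String) (wordList : List String) (debug : Bool) (out : String × List String) : Decidable (Spec_getNewWordList currTemplate letterGuess wordList debug out) := by unfold Spec_getNewWordList; infer_instance

-- ===== CLAIM (what is proved, stated in full; the proofs are below) =====
def Claim_equal_getNewWordList : Prop := ∀ (currTemplate : String) (letterGuess : String) (wordList : List String) (debug : Bool), Dom_getNewWordList currTemplate letterGuess wordList debug → Pre_getNewWordList currTemplate letterGuess wordList debug → Spec_getNewWordList currTemplate letterGuess wordList debug (getNewWordList currTemplate letterGuess wordList debug)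

-- ===== LEMMAS AND PROOFS =====

-- running-max bookkeeping behind PySem.List.max? (first maximal element)
theorem pv_foldl_mstep_some {α : Type} (f : α → Nat) (t : List α) (c : α) :
    t.foldl (fun acc x => match acc with | none => some x | some m => if f m < f x then some x else some m) (some c)
      = some (t.foldl (fun m x => if f m < f x then x else m) c) := by
  induction t generalizing c with
  | nil => rfl
  | cons a t ih => simp only [List.foldl_cons]; split_ifs <;> simp [ih]

theorem pv_max?_cons {α : Type} (f : α → Nat) (a : α) (l : List α) :
    PySem.List.max? (a :: l) f = some (l.foldl (fun m x => if f m < f x then x else m) a) := by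
  simp only [PySem.List.max?, List.foldl_cons]
  exact pv_foldl_mstep_some f l a

theorem pv_runmax {α : Type} (f : α → Nat) (l : List α) : ∀ (a : α),
    l.foldl (fun m x => if f m < f x then x else m) a
      = match PySem.List.max? l f with | none => a | some m => if f a < f m then m else a := by
  induction l with
  | nil => intro a; rfl
  | cons c t ih =>
    intro a
    rw [List.foldl_cons, ih, pv_max?_cons f c t, ih c]
    cases h : PySem.List.max? t f <;> dsimp only <;> split_ifs <;> first | rfl | omega

theorem pv_head_insertBy {α : Type} (f : α → Nat) (x : α) (acc : List α) :
    (PySem.List.insertBy (fun a b => decide (f b < f a)) x acc).head?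
      = some (match acc.head? with | none => x | some y => if f y < f x then x else y) := by
  cases acc with
  | nil => rfl
  | cons y ys => simp only [PySem.List.insertBy]; split_ifs <;> simp_all

theorem pv_head_sorted_fold {α : Type} (f : α → Nat) (ys : List α) : ∀ (acc : List α),
    (ys.foldl (fun acc x => PySem.List.insertBy (fun a b => decide (f b < f a)) x acc) acc).head?
      = ys.foldl (fun acc x => match acc with | none => some x | some m => if f m < f x then some x else some m) acc.head? := by
  induction ys with
  | nil => intro acc; rfl
  | cons c t ih =>
    intro acc
    rw [List.foldl_cons, List.foldl_cons, ih, pv_head_insertBy]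
    congr 1
    cases acc with
    | nil => rfl
    | cons y ys => by_cases h : f y < f c <;> simp [h]

theorem pv_head_sorted_rev {α : Type} (f : α → Nat) (ys : List α) :
    (PySem.List.sorted ys f true).head? = PySem.List.max? ys f := by
  have h1 : PySem.List.sorted ys f true = ys.foldl (fun acc x => PySem.List.insertBy (fun a b => decide (f b < f a)) x acc) [] := rfl
  have h2 : PySem.List.max? ys f = ys.foldl (fun acc x => match acc with | none => some x | some m => if f m < f x then some x else some m) none := rfl
  rw [h1, h2]
  exact pv_head_sorted_fold f ys []

theorem pv_insertBy_pairwise {α : Type} (g : α → Nat) (x : α) : ∀ {acc : List α},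
    acc.Pairwise (fun a b => g b ≤ g a) →
    (PySem.List.insertBy (fun a b => decide (g b < g a)) x acc).Pairwise (fun a b => g b ≤ g a) := by
  intro acc
  induction acc with
  | nil => intro _; simp [PySem.List.insertBy]
  | cons y ys ih =>
    intro h
    rw [List.pairwise_cons] at h
    simp only [PySem.List.insertBy]
    split_ifs with hlt
    · simp only [decide_eq_true_eq] at hlt
      refine List.pairwise_cons.mpr ⟨?_, List.pairwise_cons.mpr h⟩
      intro z hz
      rcases List.mem_cons.mp hz with rfl | hz
      · omega
      · have := h.1 z hz; omega
    · simp only [decide_eq_true_eq, not_lt] at hlt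
      refine List.pairwise_cons.mpr ⟨?_, ih h.2⟩
      intro z hz
      rcases (PySem.List.mem_insertBy _ x z ys).mp hz with rfl | hz
      · exact hlt
      · exact h.1 z hz

theorem pv_max?_insertBy {α : Type} (f g : α → Nat) (x : α) : ∀ {acc : List α},
    acc.Pairwise (fun a b => g b ≤ g a) →
    PySem.List.max? (PySem.List.insertBy (fun a b => decide (g b < g a)) x acc) f
      = (match PySem.List.max? acc f with
         | none => some x
         | some m => if f m < f x ∨ (¬ f x < f m ∧ g m < g x) then some x else some m) := by
  intro acc
  induction acc with
  | nil => intro _; rfl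
  | cons y t ih =>
    intro h
    rw [List.pairwise_cons] at h
    obtain ⟨hy, ht⟩ := h
    by_cases hgx : g y < g x
    · have hins : PySem.List.insertBy (fun a b => decide (g b < g a)) x (y :: t) = x :: y :: t := by
        simp [PySem.List.insertBy, hgx]
      rw [hins, pv_max?_cons f x (y :: t), pv_runmax f (y :: t) x]
      cases hM : PySem.List.max? (y :: t) f with
      | none => rfl
      | some M =>
        have hMg : g M < g x := by
          rcases List.mem_cons.mp (PySem.List.max?_mem hM) with rfl | hMt
          · exact hgx
          · have := hy M hMt; omega
        dsimp only
        split_ifs <;> first | rfl | omega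
    · have hins : PySem.List.insertBy (fun a b => decide (g b < g a)) x (y :: t) =
          y :: PySem.List.insertBy (fun a b => decide (g b < g a)) x t := by
        simp [PySem.List.insertBy, hgx]
      have hgxy : g x ≤ g y := by omega
      rw [hins, pv_max?_cons f y _, pv_runmax f _ y, ih ht,
          pv_max?_cons f y t, pv_runmax f t y]
      cases hM : PySem.List.max? t f with
      | none => dsimp only; split_ifs <;> first | rfl | omega
      | some m =>
        dsimp only
        by_cases hq : f m < f x ∨ (¬ f x < f m ∧ g m < g x)
        · rw [if_pos hq]
          dsimp only
          have hxm : f m ≤ f x := by rcases hq with h | h <;> omega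
          by_cases hp : f y < f m
          · rw [if_pos hp, if_pos hq, if_pos (show f y < f x by omega)]
          · rw [if_neg hp]
            by_cases hr : f y < f x
            · rw [if_pos hr, if_pos (Or.inl hr)]
            · rw [if_neg hr, if_neg (by rintro (h | ⟨h1, h2⟩) <;> omega)]
        · rw [if_neg hq]
          dsimp only
          by_cases hp : f y < f m
          · rw [if_pos hp, if_neg hq]
          · rw [if_neg hp]
            rw [if_neg (show ¬ (f y < f x ∨ (¬ f x < f y ∧ g y < g x)) by
              rintro (h | ⟨h1, h2⟩)
              · exact hq (Or.inl (by omega))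
              · omega)]

theorem pv_max?_sorted_fold {α : Type} (f g : α → Nat) (ks : List α) : ∀ (acc : List α),
    acc.Pairwise (fun a b => g b ≤ g a) →
    PySem.List.max? (ks.foldl (fun acc x => PySem.List.insertBy (fun a b => decide (g b < g a)) x acc) acc) f
      = ks.foldl (fun acc x => match acc with
         | none => some x
         | some m => if f m < f x ∨ (¬ f x < f m ∧ g m < g x) then some x else some m)
        (PySem.List.max? acc f) := by
  induction ks with
  | nil => intro acc _; rfl
  | cons c t ih =>
    intro acc h
    rw [List.foldl_cons, List.foldl_cons, ih _ (pv_insertBy_pairwise g c h), pv_max?_insertBy f g c h]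

-- the head of A's stable double reverse-sort is B's first lexicographic maximum
theorem pv_selection {α : Type} (f g : α → Nat) (ks : List α) :
    (PySem.List.sorted (PySem.List.sorted ks g true) f true).head? = PySem.List.max2? ks f g := by
  rw [pv_head_sorted_rev]
  have hstep : (fun (acc : Option α) (x : α) =>
      match acc with
      | none => some x
      | some m => if (decide (f m < f x) || !decide (f x < f m) && decide (g m < g x)) = true then some x else some m)
      = (fun (acc : Option α) (x : α) =>
      match acc with
      | none => some x
      | some m => if f m < f x ∨ (¬ f x < f m ∧ g m < g x) then some x else some m) := by
    funext acc x
    cases acc with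
    | none => rfl
    | some m => simp [Bool.or_eq_true, Bool.and_eq_true, decide_eq_true_eq]
  have h1 : PySem.List.sorted ks g true = ks.foldl (fun acc x => PySem.List.insertBy (fun a b => decide (g b < g a)) x acc) [] := rfl
  have h2 : PySem.List.max2? ks f g = ks.foldl (fun acc x =>
      match acc with
      | none => some x
      | some m => if (decide (f m < f x) || !decide (f x < f m) && decide (g m < g x)) = true then some x else some m) none := rfl
  rw [h1, h2, hstep]
  exact pv_max?_sorted_fold f g ks [] List.Pairwise.nil

-- A's grouping step (setdefault-to-[] then append) is a single Dict.modify
theorem pvA_dict (tm : String → String) (wl : List String) :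
    wl.foldl (fun d word =>
      let k := tm word
      let d1 := if d.contains k then d else d.insert k []
      d1.insert k (d1.getD k [] ++ [word])) PySem.Dict.empty
    = wl.foldl (fun d word => d.modify (tm word) [] (fun v => v ++ [word])) PySem.Dict.empty := by
  apply PySem.List.foldl_congr_mem
  intro d w _
  dsimp only
  by_cases hc : d.contains (tm w) = true
  · rw [if_pos hc]; rfl
  · rw [if_neg hc]
    show (d.insert (tm w) []).insert (tm w) ((d.insert (tm w) []).getD (tm w) [] ++ [w])
        = d.insert (tm w) ((d.getD (tm w) []) ++ [w])
    rw [PySem.Dict.getD_insert_self, PySem.Dict.insert_insert_self]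
    have hg : d.getD (tm w) [] = ([] : List String) := by
      apply PySem.Dict.getD_of_not_contains
      simpa using hc
    rw [hg]

-- A's group at any key is one filtering pass over wordList
theorem pvA_getD (tm : String → String) (wl : List String) (c : String) :
    (wl.foldl (fun d word => d.modify (tm word) [] (fun v => v ++ [word])) PySem.Dict.empty).getD c []
    = wl.filter (fun w => tm w == c) := by
  have h := PySem.Dict.getD_foldl_modify_append (wl.map (fun w => (tm w, w))) PySem.Dict.empty c
  rw [List.foldl_map] at h
  simpa [List.filter_map, Function.comp_def, List.map_map] using h

theorem pvA_keys (tm : String → String) (wl : List String) :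
    (wl.foldl (fun d word => d.modify (tm word) [] (fun v => v ++ [word])) PySem.Dict.empty).keys
    = PySem.Set.ofList (wl.map tm) := by
  have h := PySem.Dict.keys_foldl_modify_key wl tm [] (fun _ word => fun v => v ++ [word]) PySem.Dict.empty
  simpa [PySem.Set.update_nil_left] using h

-- B's count dict is Counter(map(tmpl, wordList))
theorem pvB_counts (tm : String → String) (wl : List String) :
    wl.foldl (fun d word =>
      let k := tm word
      d.insert k (d.getD k 0 + 1)) PySem.Dict.empty
    = PySem.Dict.counter (wl.map tm) := by
  rw [← PySem.Dict.foldl_insert_getD_add_one_eq_counter, List.foldl_map]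

theorem pv_count_filter (tm : String → String) (wl : List String) (c : String) :
    (wl.map tm).count c = (wl.filter (fun w => tm w == c)).length := by
  simp [List.count_eq_countP, List.countP_eq_length_filter, List.filter_map, Function.comp_def]

theorem pv_max2?_congr (ks : List String) (f : String → Nat) (f' : String → Int) (g : String → Nat)
    (h : ∀ a, f' a = (f a : Int)) : PySem.List.max2? ks f' g = PySem.List.max2? ks f g := by
  unfold PySem.List.max2?
  congr 1
  funext acc x
  cases acc with
  | none => rfl
  | some m => simp only [h, Nat.cast_lt]

theorem pv_pyGetD_zero_head (l : List String) : PySem.List.pyGetD l 0 "" = l.head?.getD "" := by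
  rw [PySem.List.pyGetD_zero]
  cases l <;> simp

-- ===== VERDICT (by name: the statement is the Claim_ definition above) =====
theorem getNewWordList_spec : Claim_equal_getNewWordList := by
  unfold Claim_equal_getNewWordList
  intro ct lg wl dbg _ _
  unfold Spec_getNewWordList getNewWordList getNewWordList_alt
  simp only [pvA_dict, pvB_counts, pvA_keys, pvA_getD,
    PySem.Dict.keys_counter, PySem.Dict.getD_counter]
  rw [pv_pyGetD_zero_head,
      pv_selection (fun y => (wl.filter (fun w => pvTmpl ct lg w == y)).length)
        (fun x => PySem.Str.count x "_") (PySem.Set.ofList (wl.map (pvTmpl ct lg))),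
      pv_max2?_congr (PySem.Set.ofList (wl.map (pvTmpl ct lg)))
        (fun y => (wl.filter (fun w => pvTmpl ct lg w == y)).length)
        (fun t => ((wl.map (pvTmpl ct lg)).count t : Int))
        (fun x => PySem.Str.count x "_")
        (fun a => by simp only [pv_count_filter])]
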